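-- pv_equiv track=rewrite | github.com/csklub/weekly-sessions | samples/random/longest_city.py | longest_name
-- ===== SOURCE A (Python) =====
-- def longest_name(cities):
--     # lens = [ len(c) for c in cities ] # list comprehension
--     # [ <evalutation> for <item> in <another_list> ]
--     # longest = max(lens)
--     # index = lens.index(longest)
--     # return cities[index]
--     # short version -> not optimized // O(cN) time, O(N) in space
--     # return cities[lens.index(max(lens))]
--     # optimized version -> O(N)
--     longest = 0
--     index = 0
--     i = 0
--     for c in cities:
--         len_ = len(c)
--         if len_ > longest:
--             longest = len_
--             index = i
--         i += 1
--
--     return cities[index]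
-- ===== SOURCE B (Python) =====
-- def longest_name(cities):
--     # sort by length, stable and descending: the first element is the
--     # first-occurring city of maximum length (same as A's single pass)
--     return sorted(cities, key=len, reverse=True)[0]
-- ===== Notes on version B (the rewrite author's own statement) =====
-- stated objective: alternative
-- what changed: Replaces A's running-max loop over lengths and indices with a stable descending sort by length followed by taking the first element; stability makes ties resolve to the first occurrence exactly as A does.
import Mathlib
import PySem

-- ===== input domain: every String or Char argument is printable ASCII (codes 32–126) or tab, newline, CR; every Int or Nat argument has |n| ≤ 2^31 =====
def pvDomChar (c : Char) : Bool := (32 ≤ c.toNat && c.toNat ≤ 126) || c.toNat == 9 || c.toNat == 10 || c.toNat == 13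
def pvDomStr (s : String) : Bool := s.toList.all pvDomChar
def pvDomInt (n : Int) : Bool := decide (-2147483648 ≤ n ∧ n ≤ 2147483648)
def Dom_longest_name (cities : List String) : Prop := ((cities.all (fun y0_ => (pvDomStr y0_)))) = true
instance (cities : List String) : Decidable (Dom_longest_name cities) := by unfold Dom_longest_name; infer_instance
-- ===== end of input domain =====

-- ===== PORT A =====
-- B replaces A's running-max loop with a stable descending sort by length plus taking the first element; no speed claim.
def longest_name (cities : List String) : String :=
  -- longest = 0; index = 0; i = 0; for c in cities: len_ = len(c); if len_ > longest: ...
  let s := cities.foldl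
    (fun (st : Int × Int × Int) c =>
      let len_ := PySem.Str.len c
      if st.1 < len_ then (len_, st.2.2, st.2.2 + 1) else (st.1, st.2.1, st.2.2 + 1))
    (0, 0, 0)
  -- return cities[index]  (IndexError on the empty list is excluded by Pre_)
  (PySem.List.pyGet? cities s.2.1).getD ""

-- ===== PORT B =====
def longest_name_alt (cities : List String) : String :=
  -- return sorted(cities, key=len, reverse=True)[0]
  (PySem.List.pyGet? (PySem.List.sorted cities (fun c => PySem.Str.len c) true) 0).getD ""

-- ===== PRECONDITION & SPEC =====
-- Pre_ excludes exactly the empty list, on which A raises IndexError (cities[0]).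
def Pre_longest_name (cities : List String) : Prop := cities ≠ []
instance (cities : List String) : Decidable (Pre_longest_name cities) := by unfold Pre_longest_name; infer_instance
def pvWitness_longest_name : List String := (["a", "bc"])
def Spec_longest_name (cities : List String) (out : String) : Prop := out = longest_name_alt cities
instance (cities : List String) (out : String) : Decidable (Spec_longest_name cities out) := by unfold Spec_longest_name; infer_instance

-- ===== CLAIM (what is proved, stated in full; the proofs are below) =====
def Claim_equal_longest_name : Prop := ∀ (cities : List String), Dom_longest_name cities → Pre_longest_name cities → Spec_longest_name cities (longest_name cities)

-- ===== LEMMAS AND PROOFS =====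

-- the common reference value: the first element of maximal length, as a left fold
def pvBest (l : List String) (b : String) : String :=
  l.foldl (fun b x => if PySem.Str.len b < PySem.Str.len x then x else b) b

-- A's loop body, named for the proofs (identical to the lambda in the port)
def pvStepA (st : Int × Int × Int) (c : String) : Int × Int × Int :=
  let len_ := PySem.Str.len c
  if st.1 < len_ then (len_, st.2.2, st.2.2 + 1) else (st.1, st.2.1, st.2.2 + 1)

-- B's comparison, named for the proofs
def pvBefore (a b : String) : Bool := decide (PySem.Str.len b < PySem.Str.len a)

theorem longest_name_eq (cities : List String) :
    longest_name cities
      = (PySem.List.pyGet? cities (cities.foldl pvStepA (0, 0, 0)).2.1).getD "" := rfl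

theorem longest_name_alt_eq (cities : List String) :
    longest_name_alt cities
      = (PySem.List.pyGet?
          (cities.foldl (fun acc x => PySem.List.insertBy pvBefore x acc) []) 0).getD "" := by
  unfold longest_name_alt
  rw [PySem.List.sorted_rev_eq_foldl_insertBy]
  rfl

theorem pvLen_nonneg (s : String) : 0 ≤ PySem.Str.len s := by
  simp [PySem.Str.len_eq]

theorem pvStepA_pos {b c : String} (idx i : Int) (h : PySem.Str.len b < PySem.Str.len c) :
    pvStepA (PySem.Str.len b, idx, i) c = (PySem.Str.len c, i, i + 1) := by
  simp only [pvStepA, if_pos h]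

theorem pvStepA_neg {b c : String} (idx i : Int) (h : ¬ PySem.Str.len b < PySem.Str.len c) :
    pvStepA (PySem.Str.len b, idx, i) c = (PySem.Str.len b, idx, i + 1) := by
  simp only [pvStepA, if_neg h]

theorem pvBest_cons (x : String) (l : List String) (b : String) :
    pvBest (x :: l) b = pvBest l (if PySem.Str.len b < PySem.Str.len x then x else b) := rfl

-- A's loop invariant: if the running index points (within the whole list pre ++ l)
-- at an element b whose length is the running maximum, then after folding A's loop
-- body over the remaining suffix l the index points at pvBest l b.
theorem pvA_inv (l : List String) : ∀ (pre : List String) (b : String) (idx : Int),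
    PySem.List.pyGet? (pre ++ l) idx = some b →
    PySem.List.pyGet? (pre ++ l)
      ((l.foldl pvStepA (PySem.Str.len b, idx, (pre.length : Int))).2.1)
      = some (pvBest l b) := by
  induction l with
  | nil => intro pre b idx h; simpa only [List.foldl_nil, pvBest] using h
  | cons c l' ih =>
    intro pre b idx h
    have hgc : PySem.List.pyGet? (pre ++ c :: l') (pre.length : Int) = some c := by
      rw [PySem.List.pyGet?_natCast]
      simp
    have hcast : (pre.length : Int) + 1 = (((pre ++ [c]).length : Nat) : Int) := by
      simp
    rw [List.foldl_cons, pvBest_cons]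
    by_cases hc : PySem.Str.len b < PySem.Str.len c
    · rw [pvStepA_pos idx (pre.length : Int) hc, if_pos hc, hcast]
      have := ih (pre ++ [c]) c (pre.length : Int)
        (by simp only [List.append_assoc, List.singleton_append]; exact hgc)
      simpa [List.append_assoc] using this
    · rw [pvStepA_neg idx (pre.length : Int) hc, if_neg hc, hcast]
      have := ih (pre ++ [c]) b idx (by simpa [List.append_assoc] using h)
      simpa [List.append_assoc] using this

-- A returns the first element of maximal length.
theorem pvA_eq (c : String) (rest : List String) :
    longest_name (c :: rest) = pvBest rest c := by
  have h0 : PySem.List.pyGet? (([c] : List String) ++ rest) ((0 : Nat) : Int) = some c := by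
    rw [PySem.List.pyGet?_natCast]
    simp
  have hinv := pvA_inv rest [c] c ((0 : Nat) : Int) h0
  have hstep : pvStepA ((0 : Int), (0 : Int), (0 : Int)) c
      = (PySem.Str.len c, (0 : Int), (0 : Int) + 1) := by
    by_cases hc : (0 : Int) < PySem.Str.len c
    · simp only [pvStepA, if_pos hc]
    · have h0c : PySem.Str.len c = 0 := le_antisymm (not_lt.mp hc) (pvLen_nonneg c)
      simp only [pvStepA, h0c, lt_irrefl, if_false]
  rw [longest_name_eq, List.foldl_cons, hstep]
  simp only [List.singleton_append, List.length_singleton, Nat.cast_one, Nat.cast_zero] at hinv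
  simp only [zero_add]
  rw [hinv]
  rfl

-- one unfolding step of insertion
theorem pvInsert_pos {x y : String} (ys : List String) (h : PySem.Str.len y < PySem.Str.len x) :
    PySem.List.insertBy pvBefore x (y :: ys) = x :: y :: ys := by
  show (if pvBefore x y then x :: y :: ys else y :: PySem.List.insertBy pvBefore x ys) = _
  simp only [pvBefore, decide_eq_true h, if_true]

theorem pvInsert_neg {x y : String} (ys : List String) (h : ¬ PySem.Str.len y < PySem.Str.len x) :
    PySem.List.insertBy pvBefore x (y :: ys) = y :: PySem.List.insertBy pvBefore x ys := by
  show (if pvBefore x y then x :: y :: ys else y :: PySem.List.insertBy pvBefore x ys) = _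
  simp only [pvBefore, decide_eq_false h, Bool.false_eq_true, if_false]

-- B's loop invariant: the head of the insertion-sort accumulator is the running
-- first-of-maximal-length element.
theorem pvB_inv (l : List String) : ∀ (y : String) (ys : List String),
    ∃ t, l.foldl (fun acc x => PySem.List.insertBy pvBefore x acc) (y :: ys)
      = pvBest l y :: t := by
  induction l with
  | nil => intro y ys; exact ⟨ys, rfl⟩
  | cons x l' ih =>
    intro y ys
    rw [List.foldl_cons, pvBest_cons]
    by_cases h : PySem.Str.len y < PySem.Str.len x
    · rw [pvInsert_pos ys h, if_pos h]
      exact ih x (y :: ys)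
    · rw [pvInsert_neg ys h, if_neg h]
      exact ih y (PySem.List.insertBy pvBefore x ys)

-- B returns the first element of maximal length.
theorem pvB_eq (c : String) (rest : List String) :
    longest_name_alt (c :: rest) = pvBest rest c := by
  obtain ⟨t, ht⟩ := pvB_inv rest c []
  rw [longest_name_alt_eq, List.foldl_cons,
    show PySem.List.insertBy pvBefore c [] = [c] from rfl, ht,
    show (0 : Int) = ((0 : Nat) : Int) from rfl, PySem.List.pyGet?_natCast]
  rfl

-- ===== VERDICT (by name: the statement is the Claim_ definition above) =====
theorem longest_name_spec : Claim_equal_longest_name := by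
  intro cities _ hpre
  unfold Spec_longest_name
  obtain ⟨c, rest, rfl⟩ := List.exists_cons_of_ne_nil hpre
  rw [pvA_eq, pvB_eq]
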